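-- pv_equiv track=rewrite | github.com/Arsen1302/Code-copy-detector | TestData/solutions/problem_1496_4.py | solution_1496_4
-- ===== SOURCE A (Python) =====
-- from typing import List
--
-- def solution_1496_4(f: int) -> List[int]:
--
-- 	if f%2:
-- 		return []
--
-- 	res, i = [], 2
-- 	while i<=f:
-- 		res.append(i)
-- 		f -= i
-- 		i += 2
--
-- 	res[-1]+=f
-- 	return res
-- ===== SOURCE B (Python) =====
-- from math import isqrt
-- from typing import List
--
-- def solution_1496_4(f: int) -> List[int]:
--     if f % 2:
--         return []
--     k = 0 if f < 2 else (isqrt(4 * f + 1) - 1) // 2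
--     res = list(range(2, 2 * k + 2, 2))
--     res[-1] += f - k * (k + 1)
--     return res
-- ===== Notes on version B (the rewrite author's own statement) =====
-- stated objective: alternative
-- what changed: B replaces A's decrement-and-append while-loop by a closed form: the term count k is computed arithmetically as (isqrt(4*f+1)-1)//2, the list is a single range call, and the remainder f-k*(k+1) is added to the last element.
import Mathlib
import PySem

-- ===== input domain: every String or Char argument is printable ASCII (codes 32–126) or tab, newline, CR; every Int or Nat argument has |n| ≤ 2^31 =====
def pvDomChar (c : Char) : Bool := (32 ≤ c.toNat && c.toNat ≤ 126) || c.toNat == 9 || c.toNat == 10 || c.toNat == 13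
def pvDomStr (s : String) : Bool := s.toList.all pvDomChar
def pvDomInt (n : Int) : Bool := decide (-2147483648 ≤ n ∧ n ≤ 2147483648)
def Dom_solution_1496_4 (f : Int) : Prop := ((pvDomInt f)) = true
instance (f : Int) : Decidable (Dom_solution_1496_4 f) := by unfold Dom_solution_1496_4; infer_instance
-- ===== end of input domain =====

-- B computes the term count in closed form with isqrt instead of A's decrementing loop;
-- both programs raise IndexError on even f below two (empty res, res[-1]), which Pre_ excludes.

-- ===== PORT A =====
-- A's while loop: state (res, f, i); the '2 ≤ i' conjunct only makes the recursion total
-- (every reachable state has i ≥ 2, starting at i = 2 and growing).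
def loopA (f i : Int) (res : List Int) : List Int × Int :=
  if _h : 2 ≤ i ∧ i ≤ f then loopA (f - i) (i + 2) (res ++ [i]) else (res, f)
termination_by (f - i + 4).toNat
decreasing_by omega

def solution_1496_4 (f : Int) : List Int :=
  if PySem.Int.mod f 2 ≠ 0 then []
  else
    let p := loopA f 2 []
    -- res[-1] += f : under Pre_ the list is nonempty, so the default is never used
    p.1.dropLast ++ [p.1.getLast?.getD 0 + p.2]

-- ===== PORT B =====
def solution_1496_4_alt (f : Int) : List Int :=
  if PySem.Int.mod f 2 ≠ 0 then []
  else
    let k : Int := if f < 2 then 0 else PySem.Int.floordiv (Int.sqrt (4 * f + 1) - 1) 2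
    let res := PySem.List.pyRange 2 (2 * k + 2) 2
    res.dropLast ++ [res.getLast?.getD 0 + (f - k * (k + 1))]

-- ===== PRECONDITION & SPEC =====
-- Pre_ excludes exactly the nonpositive-or-zero-count even inputs (even f below two), on which A (and B) raise IndexError at 'res[-1] += f'.
def Pre_solution_1496_4 (f : Int) : Prop := PySem.Int.mod f 2 = 1 ∨ 2 ≤ f
instance (f : Int) : Decidable (Pre_solution_1496_4 f) := by unfold Pre_solution_1496_4; infer_instance

def pvWitness_solution_1496_4 : Int := (12)

def Spec_solution_1496_4 (f : Int) (out : List Int) : Prop := out = solution_1496_4_alt f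
instance (f : Int) (out : List Int) : Decidable (Spec_solution_1496_4 f out) := by unfold Spec_solution_1496_4; infer_instance

-- ===== CLAIM (what is proved, stated in full; the proofs are below) =====
def Claim_equal_solution_1496_4 : Prop := ∀ (f : Int), Dom_solution_1496_4 f → Pre_solution_1496_4 f → Spec_solution_1496_4 f (solution_1496_4 f)

-- ===== LEMMAS AND PROOFS =====

-- Running A's loop from state (f - (j-1)*j, 2*j) with j = k+1-c appends 2*j, …, 2*k and
-- leaves remainder f - k*(k+1), provided k*(k+1) ≤ f < (k+1)*(k+2).
lemma loopA_run (k : Nat) (f : Int) (hk1 : (k : Int) * (k + 1) ≤ f)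
    (hk2 : f < ((k : Int) + 1) * ((k : Int) + 2)) :
    ∀ (c : Nat), c ≤ k → ∀ acc : List Int,
      loopA (f - ((k - c : Nat) : Int) * (((k - c : Nat) : Int) + 1)) (2 * ((k + 1 - c : Nat) : Int)) acc
        = (acc ++ (List.range' (k + 1 - c) c).map (fun m : Nat => 2 * (m : Int)), f - (k : Int) * ((k : Int) + 1)) := by
  intro c
  induction c with
  | zero =>
    intro _ acc
    rw [loopA, dif_neg]
    · simp
    · simp only [Nat.sub_zero]
      push_cast
      intro h
      nlinarith [h.2]
  | succ c ih =>
    intro hc acc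
    have hc' : c ≤ k := by omega
    have hcond : 2 ≤ 2 * ((k + 1 - (c+1) : Nat) : Int) ∧
        2 * ((k + 1 - (c+1) : Nat) : Int) ≤ f - ((k - (c+1) : Nat) : Int) * (((k - (c+1) : Nat) : Int) + 1) := by
      constructor
      · have : (1 : Int) ≤ ((k + 1 - (c+1) : Nat) : Int) := by
          have : 1 ≤ k + 1 - (c+1) := by omega
          exact_mod_cast this
        omega
      · -- j*(j+1) ≤ f for j = k-c ≤ k
        have hj : ((k - (c+1) : Nat) : Int) + 1 = ((k + 1 - (c+1) : Nat) : Int) := by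
          omega
        have hjk : ((k + 1 - (c+1) : Nat) : Int) ≤ (k : Int) := by
          have : k + 1 - (c+1) ≤ k := by omega
          exact_mod_cast this
        have hj0 : (0 : Int) ≤ ((k - (c+1) : Nat) : Int) := by positivity
        nlinarith
    rw [loopA, dif_pos hcond]
    have harg1 : f - ((k - (c+1) : Nat) : Int) * (((k - (c+1) : Nat) : Int) + 1)
        - 2 * ((k + 1 - (c+1) : Nat) : Int)
        = f - ((k - c : Nat) : Int) * (((k - c : Nat) : Int) + 1) := by
      have e1 : ((k - c : Nat) : Int) = (k : Int) - c := by omega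
      have e2 : ((k - (c+1) : Nat) : Int) = (k : Int) - c - 1 := by omega
      have e3 : ((k + 1 - (c+1) : Nat) : Int) = (k : Int) - c := by omega
      rw [e1, e2, e3]; ring
    have harg2 : 2 * ((k + 1 - (c+1) : Nat) : Int) + 2 = 2 * ((k + 1 - c : Nat) : Int) := by
      have e3 : ((k + 1 - (c+1) : Nat) : Int) = (k : Int) - c := by omega
      have e4 : ((k + 1 - c : Nat) : Int) = (k : Int) - c + 1 := by omega
      rw [e3, e4]; ring
    rw [harg1, harg2, ih hc']
    have he : k + 1 - (c+1) + 1 = k + 1 - c := by omega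
    have hr : List.range' (k + 1 - (c+1)) (c+1) = (k + 1 - (c+1)) :: List.range' (k + 1 - c) c := by
      rw [List.range'_succ, he]
    rw [hr]
    simp only [List.map_cons, List.append_assoc, List.singleton_append]

-- bracketing of the closed-form count for f ≥ 2
lemma kB_bracket (f : Int) (hf : 2 ≤ f) :
    1 ≤ PySem.Int.floordiv (Int.sqrt (4 * f + 1) - 1) 2 ∧
    (PySem.Int.floordiv (Int.sqrt (4 * f + 1) - 1) 2) * (PySem.Int.floordiv (Int.sqrt (4 * f + 1) - 1) 2 + 1) ≤ f ∧
    f < (PySem.Int.floordiv (Int.sqrt (4 * f + 1) - 1) 2 + 1) * (PySem.Int.floordiv (Int.sqrt (4 * f + 1) - 1) 2 + 2) := by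
  set s : Int := Int.sqrt (4 * f + 1) with hs
  have hnat : ((4 * f + 1).toNat : Int) = 4 * f + 1 := by omega
  have hs1 : s * s ≤ 4 * f + 1 := by
    have h := Nat.sqrt_le' (4 * f + 1).toNat
    rw [pow_two] at h
    have h' : ((Nat.sqrt (4 * f + 1).toNat * Nat.sqrt (4 * f + 1).toNat : Nat) : Int) ≤ ((4 * f + 1).toNat : Int) := by exact_mod_cast h
    simpa [hs, Int.sqrt, hnat] using h'
  have hs2 : 4 * f + 1 < (s + 1) * (s + 1) := by
    have h := Nat.lt_succ_sqrt' (4 * f + 1).toNat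
    rw [pow_two, Nat.succ_eq_add_one] at h
    have h' : ((4 * f + 1).toNat : Int) < (((Nat.sqrt (4 * f + 1).toNat + 1) * (Nat.sqrt (4 * f + 1).toNat + 1) : Nat) : Int) := by exact_mod_cast h
    rw [hnat] at h'
    have hcast : ((((Nat.sqrt (4 * f + 1).toNat + 1) * (Nat.sqrt (4 * f + 1).toNat + 1) : Nat) : Int) = (s + 1) * (s + 1)) := by
      push_cast; simp [hs, Int.sqrt]
    rw [hcast] at h'; exact h'
  have hs0 : 0 ≤ s := Int.sqrt_nonneg _
  have hs3 : 3 ≤ s := by nlinarith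
  rw [PySem.Int.floordiv_eq_ediv_of_pos (by norm_num)]
  set q : Int := (s - 1) / 2 with hq
  have hq1 : 2 * q ≤ s - 1 ∧ s - 1 < 2 * q + 2 := by omega
  refine ⟨by omega, ?_, ?_⟩
  · nlinarith [hq1.1, hq1.2]
  · nlinarith [hq1.1, hq1.2]

-- B's range(2, 2k+2, 2) is the same list A's loop builds
lemma pyRange_two (k : Nat) (hk : 1 ≤ k) :
    PySem.List.pyRange 2 (2 * (k : Int) + 2) 2 = (List.range' 1 k).map (fun m : Nat => 2 * (m : Int)) := by
  rw [PySem.List.pyRange_of_pos _ _ (by norm_num)]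
  have hlt : (2 : Int) < 2 * (k : Int) + 2 := by
    have : (1 : Int) ≤ (k : Int) := by exact_mod_cast hk
    omega
  rw [if_pos hlt]
  have hcnt : ((2 * (k : Int) + 2 - 2 + 2 - 1) / 2).toNat = k := by omega
  rw [hcnt]
  rw [List.range'_eq_map_range, List.map_map]
  apply List.map_congr_left
  intro m _
  simp only [Function.comp_apply]
  push_cast
  ring

-- ===== VERDICT (by name: the statement is the Claim_ definition above) =====
theorem solution_1496_4_spec : Claim_equal_solution_1496_4 := by
  intro f _ hpre
  unfold Spec_solution_1496_4 solution_1496_4 solution_1496_4_alt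
  rcases PySem.Int.mod_two_eq f with hm | hm
  · -- even: f ≥ 2 by Pre_
    rw [hm]
    rw [if_neg (show ¬((0:Int) ≠ 0) by simp), if_neg (show ¬((0:Int) ≠ 0) by simp)]
    have hf : 2 ≤ f := by
      rcases hpre with h' | h'
      · rw [hm] at h'; norm_num at h'
      · exact h'
    rw [if_neg (by omega)]
    set kB : Int := PySem.Int.floordiv (Int.sqrt (4 * f + 1) - 1) 2 with hkB
    obtain ⟨hk1, hk2, hk3⟩ := kB_bracket f hf
    set k : Nat := kB.toNat with hk
    have hkc : (k : Int) = kB := by omega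
    have hrun := loopA_run k f (by rw [hkc]; exact hk2) (by rw [hkc]; linarith) k (le_refl k) []
    simp only [Nat.sub_self] at hrun
    norm_num at hrun
    have hk1n : 1 ≤ k := by omega
    have hrange : PySem.List.pyRange 2 (2 * kB + 2) 2 = (List.range' 1 k).map (fun m : Nat => 2 * (m : Int)) := by
      rw [← hkc]; exact pyRange_two k hk1n
    rw [hrun]
    simp only [hrange, hkc]
  · -- odd: both return []
    rw [hm]; norm_num
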